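-- pv_equiv track=rewrite | github.com/lookinmin/CodingTest | 이분탐색/BOJ_7795.py | count
-- ===== SOURCE A (Python) =====
-- def count(arrA, arrB):
--     A = sorted(arrA)
--     B = sorted(arrB)
--     cnt = 0
--     for i in A:
--         for j in B:
--             if j >= i:
--                 continue
--             if i > j:
--                 cnt += 1
--     return cnt
-- ===== SOURCE B (Python) =====
-- def count(arrA, arrB):
--     B = sorted(arrB)
--     total = 0
--     for a in arrA:
--         lo, hi = 0, len(B)
--         while lo < hi:
--             mid = (lo + hi) // 2
--             if B[mid] < a:
--                 lo = mid + 1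
--             else:
--                 hi = mid
--         total += lo
--     return total
-- ===== Notes on version B (the rewrite author's own statement) =====
-- stated objective: faster
-- what changed: Replaces the nested scan over sorted A and B with one sort of B plus a hand-rolled binary search (bisect_left) per element of arrA, summing the counts of smaller B elements.
import Mathlib
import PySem

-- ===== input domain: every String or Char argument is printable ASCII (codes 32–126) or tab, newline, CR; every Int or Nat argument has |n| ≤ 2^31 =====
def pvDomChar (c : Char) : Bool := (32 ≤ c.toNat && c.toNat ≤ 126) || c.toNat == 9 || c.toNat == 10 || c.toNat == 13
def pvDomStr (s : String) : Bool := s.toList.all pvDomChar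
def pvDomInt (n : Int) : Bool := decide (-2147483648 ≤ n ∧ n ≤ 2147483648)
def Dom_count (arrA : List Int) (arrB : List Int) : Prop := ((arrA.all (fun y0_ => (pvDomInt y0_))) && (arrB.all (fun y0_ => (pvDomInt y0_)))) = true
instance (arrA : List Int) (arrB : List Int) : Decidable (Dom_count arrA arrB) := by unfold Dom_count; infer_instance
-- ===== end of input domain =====

-- B replaces A's nested scan with a sort of B and a per-element binary search: asymptotically faster.

-- ===== PORT A =====
-- literal port of A: sort both lists, nested loop counting j < i
def count (arrA : List Int) (arrB : List Int) : Int :=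
  let A := PySem.List.sorted arrA (fun x => x)
  let B := PySem.List.sorted arrB (fun x => x)
  A.foldl (fun cnt i =>
    B.foldl (fun c j =>
      if j ≥ i then c
      else if i > j then c + 1
      else c) cnt) 0

-- ===== PORT B =====
-- hand-rolled bisect_left from Source B (while lo < hi: mid = (lo+hi)//2 …); B[mid] is in range whenever taken
-- fuel = hi - lo bounds the number of halvings; it only makes the loop structurally total
def blCountAux (fuel : Nat) (B : List Int) (a : Int) (lo hi : Nat) : Nat :=
  match fuel with
  | 0 => lo
  | fuel + 1 =>
    if lo < hi then
      if B.getD ((lo + hi) / 2) 0 < a then blCountAux fuel B a ((lo + hi) / 2 + 1) hi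
      else blCountAux fuel B a lo ((lo + hi) / 2)
    else lo

def blCount (B : List Int) (a : Int) (lo hi : Nat) : Nat :=
  blCountAux (hi - lo) B a lo hi

def count_alt (arrA : List Int) (arrB : List Int) : Int :=
  let B := PySem.List.sorted arrB (fun x => x)
  arrA.foldl (fun total a => total + (blCount B a 0 B.length : Int)) 0

-- ===== PRECONDITION & SPEC =====
def Spec_count (arrA : List Int) (arrB : List Int) (out : Int) : Prop := out = count_alt arrA arrB
instance (arrA : List Int) (arrB : List Int) (out : Int) : Decidable (Spec_count arrA arrB out) := by unfold Spec_count; infer_instance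

-- ===== CLAIM (what is proved, stated in full; the proofs are below) =====
def Claim_equal_count : Prop := ∀ (arrA : List Int) (arrB : List Int), Dom_count arrA arrB → Spec_count arrA arrB (count arrA arrB)

-- ===== LEMMAS AND PROOFS =====

-- on a (≤)-sorted list, the elements < a are exactly the first countP positions
theorem sorted_lt_iff_lt_countP (B : List Int) (hs : B.Pairwise (· ≤ ·)) (a : Int)
    (i : Nat) (h : i < B.length) :
    B[i] < a ↔ i < B.countP (fun b => decide (b < a)) := by
  induction B generalizing i with
  | nil => simp at h
  | cons b bs ih =>
    have hs' : bs.Pairwise (· ≤ ·) := (List.pairwise_cons.mp hs).2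
    have hble : ∀ x ∈ bs, b ≤ x := (List.pairwise_cons.mp hs).1
    by_cases hb : b < a
    · cases i with
      | zero =>
        simp [hb]
      | succ j =>
        have hj : j < bs.length := by simpa using h
        have hthis := ih hs' j hj
        simp only [List.getElem_cons_succ, List.countP_cons, hb, decide_true, if_true]
        rw [hthis]
        omega
    · have hzero : bs.countP (fun x => decide (x < a)) = 0 := by
        rw [List.countP_eq_zero]
        intro x hx
        simp only [decide_eq_true_eq]
        exact not_lt.mpr (le_trans (not_lt.mp hb) (hble x hx))
      cases i with
      | zero =>
        simp [hb, hzero]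
      | succ j =>
        have hj : j < bs.length := by simpa using h
        have hge : ¬ bs[j] < a :=
          fun hlt => hb (lt_of_le_of_lt (hble _ (List.getElem_mem hj)) hlt)
        simp [hb, hzero, hge]

-- binary search converges to countP (· < a) on a sorted list
theorem blCountAux_eq (B : List Int) (hs : B.Pairwise (· ≤ ·)) (a : Int) :
    ∀ fuel lo hi, hi - lo ≤ fuel → lo ≤ B.countP (fun b => decide (b < a)) →
      B.countP (fun b => decide (b < a)) ≤ hi → hi ≤ B.length →
      blCountAux fuel B a lo hi = B.countP (fun b => decide (b < a)) := by
  intro fuel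
  induction fuel with
  | zero =>
    intro lo hi hf h1 h2 h3
    simp only [blCountAux]
    omega
  | succ fuel ih =>
    intro lo hi hf h1 h2 h3
    simp only [blCountAux]
    by_cases h : lo < hi
    · rw [if_pos h]
      have hmid : (lo + hi) / 2 < B.length := by omega
      by_cases hlt : B.getD ((lo + hi) / 2) 0 < a
      · rw [if_pos hlt]
        have hlt' : B[(lo + hi) / 2] < a := by
          rwa [List.getD_eq_getElem B 0 hmid] at hlt
        have hcnt := (sorted_lt_iff_lt_countP B hs a _ hmid).mp hlt'
        exact ih _ _ (by omega) (by omega) h2 h3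
      · rw [if_neg hlt]
        have hcnt : ¬ ((lo + hi) / 2) < B.countP (fun b => decide (b < a)) := by
          intro hc
          exact hlt (by
            rw [List.getD_eq_getElem B 0 hmid]
            exact (sorted_lt_iff_lt_countP B hs a _ hmid).mpr hc)
        exact ih _ _ (by omega) h1 (by omega) (by omega)
    · rw [if_neg h]
      omega

theorem blCount_eq (B : List Int) (hs : B.Pairwise (· ≤ ·)) (a : Int) :
    blCount B a 0 B.length = B.countP (fun b => decide (b < a)) := by
  unfold blCount
  exact blCountAux_eq B hs a _ 0 B.length (by omega) (Nat.zero_le _)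
    List.countP_le_length le_rfl

-- A's inner loop adds the number of elements of B below i
theorem inner_loop (i : Int) (B : List Int) (c : Int) :
    B.foldl (fun c j => if j ≥ i then c else if i > j then c + 1 else c) c
      = c + (B.countP (fun j => decide (j < i)) : Int) := by
  induction B generalizing c with
  | nil => simp
  | cons b bs ih =>
    simp only [List.foldl_cons, List.countP_cons]
    by_cases hb : b ≥ i
    · have hnb : ¬ b < i := not_lt.mpr hb
      rw [if_pos hb, ih]
      simp [hnb]
    · have hlt : i > b := lt_of_not_ge hb
      rw [if_neg hb, if_pos hlt, ih]
      simp only [show decide (b < i) = true by simpa using hlt, if_true]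
      push_cast
      ring

-- folding the per-element counts equals the sum of the mapped counts
theorem foldl_add_map (f : Int → Int) (l : List Int) (c : Int) :
    l.foldl (fun acc x => acc + f x) c = c + (l.map f).sum := by
  induction l generalizing c with
  | nil => simp
  | cons x xs ih => simp [ih]; ring

-- ===== VERDICT (by name: the statement is the Claim_ definition above) =====
theorem count_spec : Claim_equal_count := by
  intro arrA arrB _
  unfold Spec_count count count_alt
  have hsB : (PySem.List.sorted arrB (fun x => x)).Pairwise (· ≤ ·) :=
    PySem.List.sorted_pairwise arrB (fun x => x)
  set SB := PySem.List.sorted arrB (fun x => x) with hSB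
  have hinner : ∀ (cnt i : Int),
      SB.foldl (fun c j => if j ≥ i then c else if i > j then c + 1 else c) cnt
        = cnt + (SB.countP (fun j => decide (j < i)) : Int) := fun cnt i => inner_loop i SB cnt
  have hA : (PySem.List.sorted arrA (fun x => x)).foldl
      (fun cnt i => SB.foldl (fun c j => if j ≥ i then c else if i > j then c + 1 else c) cnt) 0
      = ((PySem.List.sorted arrA (fun x => x)).map
          (fun i => (SB.countP (fun j => decide (j < i)) : Int))).sum := by
    rw [show (fun cnt i => SB.foldl (fun c j => if j ≥ i then c else if i > j then c + 1 else c) cnt)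
        = (fun cnt i => cnt + (SB.countP (fun j => decide (j < i)) : Int)) from funext₂ hinner]
    simpa using foldl_add_map (fun i => (SB.countP (fun j => decide (j < i)) : Int))
      (PySem.List.sorted arrA (fun x => x)) 0
  have hB : arrA.foldl (fun total a => total + (blCount SB a 0 SB.length : Int)) 0
      = (arrA.map (fun a => (blCount SB a 0 SB.length : Int))).sum := by
    simpa using foldl_add_map (fun a => (blCount SB a 0 SB.length : Int)) arrA 0
  simp only [hA, hB]
  have hbl : ∀ a : Int, blCount SB a 0 SB.length = SB.countP (fun j => decide (j < a)) :=
    fun a => blCount_eq SB hsB a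
  have hmapeq : (arrA.map (fun a => (blCount SB a 0 SB.length : Int)))
      = arrA.map (fun a => (SB.countP (fun j => decide (j < a)) : Int)) := by
    exact List.map_congr_left fun a _ => by rw [hbl a]
  rw [hmapeq]
  exact ((PySem.List.sorted_perm arrA (fun x => x) false).map
    (fun i => (SB.countP (fun j => decide (j < i)) : Int))).sum_eq
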